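-- pv_equiv track=rewrite | github.com/ssanderson/dask | dask/order.py | ndependents
-- ===== SOURCE A (Python) =====
-- def ndependents(dependencies, dependents):
--     """ Number of total data elements that depend on key
--
--     For each key we return the number of data that can only be run after this
--     key is run.  The root nodes have value 1 while deep child nodes will have
--     larger values.
--
--     Examples
--     --------
--
--     >>> dsk = {'a': 1, 'b': (inc, 'a'), 'c': (inc, 'b')}
--     >>> dependencies, dependents = get_deps(dsk)
--
--     >>> sorted(ndependents(dependencies, dependents).items())
--     [('a', 3), ('b', 2), ('c', 1)]
--     """
--     result = dict()
--
--     roots = [k for k, v in dependents.items() if not v]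
--
--     result.update(dict((r, 1) for r in roots))
--
--     leaves = [k for k, v in dependencies.items() if not v]
--
--     for leaf in leaves:
--         _ndependents(leaf, result, dependencies, dependents)
--
--     return result
--
-- def _ndependents(key, result, dependencies, dependents):
--     """ Helper function for ndependents """
--     if key not in result:
--         deps = dependents[key]
--         result[key] = sum(
--             [_ndependents(k, result, dependencies, dependents)
--              for k in deps]) + 1
--     return result[key]
-- ===== SOURCE B (Python) =====
-- def ndependents(dependencies, dependents):
--     result = {k: 1 for k, v in dependents.items() if not v}
--     for leaf, v in dependencies.items():
--         if v:
--             continue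
--         if leaf in result:
--             continue
--         frames = [(leaf, list(dependents[leaf]), 0)]
--         while frames:
--             key, deps, acc = frames.pop()
--             if not deps:
--                 result[key] = acc + 1
--             else:
--                 d = deps[0]
--                 if d in result:
--                     frames.append((key, deps[1:], acc + result[d]))
--                 else:
--                     frames.append((key, deps, acc))
--                     frames.append((d, list(dependents[d]), 0))
--     return result
-- ===== Notes on version B (the rewrite author's own statement) =====
-- stated objective: alternative
-- what changed: A computes each key's value by memoized recursion (_ndependents recursing through dependents with a shared result dict); B replaces the recursion by an iterative depth-first traversal driven by an explicit stack of (key, remaining-dependents, partial-sum) frames, resolving already-computed dependents from the result dict and finalizing a key when its frame's dependent list is exhausted; B returns the same dict. Pre_ excludes only inputs on which A raises: a KeyError (a key reachable from a leaf missing from dependents) or unbounded recursion on a reachable cycle.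
import Mathlib
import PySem

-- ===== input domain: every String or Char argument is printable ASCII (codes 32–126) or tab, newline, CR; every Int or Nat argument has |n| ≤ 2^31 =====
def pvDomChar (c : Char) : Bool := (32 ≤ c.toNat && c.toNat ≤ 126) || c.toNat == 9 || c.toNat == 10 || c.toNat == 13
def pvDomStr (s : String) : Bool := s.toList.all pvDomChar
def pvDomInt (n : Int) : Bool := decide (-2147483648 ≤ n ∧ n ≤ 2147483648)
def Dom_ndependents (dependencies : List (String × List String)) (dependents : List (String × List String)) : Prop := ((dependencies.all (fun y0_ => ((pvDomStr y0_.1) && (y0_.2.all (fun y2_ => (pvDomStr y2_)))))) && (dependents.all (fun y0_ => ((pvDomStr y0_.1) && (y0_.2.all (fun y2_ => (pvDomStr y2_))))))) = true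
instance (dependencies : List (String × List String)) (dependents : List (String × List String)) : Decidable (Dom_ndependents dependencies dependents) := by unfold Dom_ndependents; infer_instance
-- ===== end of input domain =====

-- B replaces A's memoized recursion (_ndependents) by an explicit iterative frame stack
-- (objective: alternative decomposition, same asymptotic cost).
-- Python `dict` arguments are modelled as association lists in insertion order.

-- ===== PORT A =====
-- _ndependents: memoized recursion over `dependents`; fuel bounds the recursion depth
-- (none = the fuel ran out or a KeyError: both only outside Pre_).
mutual
def pvGoA (D : PySem.Dict String (List String)) : Nat → String → PySem.Dict String Int →
    Option (PySem.Dict String Int × Int)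
  | 0, _, _ => none
  | n+1, key, r =>
    match r.get? key with
    | some v => some (r, v)
    | none =>
      match D.get? key with
      | none => none
      | some deps =>
        match pvGoAList D n deps r with
        | none => none
        | some (r1, s) => some (r1.insert key (s + 1), s + 1)
termination_by n _ _ => (n, 0)
decreasing_by all_goals (first | exact Prod.Lex.left _ _ (Nat.lt_succ_self _) | exact Prod.Lex.right _ (by simp only [List.length_cons]; omega))

-- the list comprehension `[_ndependents(k, …) for k in deps]` summed left to right
def pvGoAList (D : PySem.Dict String (List String)) : Nat → List String → PySem.Dict String Int →
    Option (PySem.Dict String Int × Int)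
  | _, [], r => some (r, 0)
  | n, k :: ks, r =>
    match pvGoA D n k r with
    | none => none
    | some (r1, v) =>
      match pvGoAList D n ks r1 with
      | none => none
      | some (r2, s) => some (r2, v + s)
termination_by n ks _ => (n, ks.length + 1)
decreasing_by all_goals (first | exact Prod.Lex.left _ _ (Nat.lt_succ_self _) | exact Prod.Lex.right _ (by simp only [List.length_cons]; omega))
end

def ndependents (dependencies : List (String × List String)) (dependents : List (String × List String)) : List (String × Int) :=
  let D := PySem.Dict.ofList dependents
  let C := PySem.Dict.ofList dependencies
  let roots := (D.items.filter (fun p => p.2.isEmpty)).map Prod.fst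
  let result := roots.foldl (fun r k => r.insert k (1 : Int)) PySem.Dict.empty
  let leaves := (C.items.filter (fun p => p.2.isEmpty)).map Prod.fst
  let final := leaves.foldl (fun r leaf =>
    match pvGoA D (D.items.length + 1) leaf r with
    | some p => p.1
    | none => r) result
  final.items

-- ===== PORT B =====
-- the `while frames:` loop; each frame is (key, remaining deps, partial sum); fuel is
-- consumed only when a new frame is pushed (none = KeyError or fuel out: only outside Pre_).
def pvGoB (D : PySem.Dict String (List String)) : Nat → List (String × List String × Int) →
    PySem.Dict String Int → Option (PySem.Dict String Int)
  | _, [], r => some r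
  | n, (key, [], acc) :: fs, r => pvGoB D n fs (r.insert key (acc + 1))
  | n, (key, d :: ds, acc) :: fs, r =>
    match r.get? d with
    | some v => pvGoB D n ((key, ds, acc + v) :: fs) r
    | none =>
      match D.get? d with
      | none => none
      | some dd =>
        match n with
        | 0 => none
        | m+1 => pvGoB D m ((d, dd, 0) :: (key, d :: ds, acc) :: fs) r
termination_by n fs _ => (n, (fs.map (fun f => f.2.1.length + 1)).sum)
decreasing_by all_goals (first | exact Prod.Lex.left _ _ (Nat.lt_succ_self _) | exact Prod.Lex.right _ (by simp only [List.map_cons, List.sum_cons, List.length_cons]; omega))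

def ndependents_alt (dependencies : List (String × List String)) (dependents : List (String × List String)) : List (String × Int) :=
  let D := PySem.Dict.ofList dependents
  let result := D.items.foldl (fun r p => if p.2.isEmpty then r.insert p.1 (1 : Int) else r) PySem.Dict.empty
  let C := PySem.Dict.ofList dependencies
  let final := C.items.foldl (fun r p =>
    if p.2.isEmpty then
      if (r.get? p.1).isSome then r
      else
        match D.get? p.1 with
        | none => r
        | some dd => (pvGoB D (D.items.length + 1) [(p.1, dd, 0)] r).getD r
    else r) result
  final.items

-- ===== PRECONDITION & SPEC =====
-- pvRanks: the longest-path rank of each key along `dependents` edges, obtained by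
-- |keys| rounds of the one-step rank update (a plain graph invariant of the input).
def pvRankStep (D : PySem.Dict String (List String)) (R : PySem.Dict String Nat) : PySem.Dict String Nat :=
  D.items.foldl (fun R' p => R'.insert p.1 (p.2.foldl (fun m d => max m (R.getD d 0 + 1)) 0)) PySem.Dict.empty
def pvRanks (D : PySem.Dict String (List String)) : PySem.Dict String Nat :=
  (pvRankStep D)^[D.items.length] PySem.Dict.empty
-- pvReach: the keys reachable from the leaves of `dependencies` along `dependents` edges.
def pvReachStep (D : PySem.Dict String (List String)) (S : List String) : List String :=
  S.foldl (fun s k => PySem.Set.update s (D.getD k [])) S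
def pvReach (C D : PySem.Dict String (List String)) : List String :=
  (pvReachStep D)^[C.items.length + D.items.length + 1]
    (PySem.Set.ofList ((C.items.filter (fun p => p.2.isEmpty)).map Prod.fst))
def pvPreCheck (dependencies : List (String × List String)) (dependents : List (String × List String)) : Bool :=
  let D := PySem.Dict.ofList dependents
  let C := PySem.Dict.ofList dependencies
  let S := pvReach C D
  let rk := fun k => (pvRanks D).getD k 0
  (pvReachStep D S == S) &&
  S.all (fun k => D.contains k) &&
  S.all (fun k => (D.getD k []).all (fun d => rk d < rk k)) &&
  S.all (fun k => decide (rk k ≤ D.items.length))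
-- Pre_ excludes exactly the inputs on which A raises — a KeyError (a key reachable from a
-- leaf of `dependencies` missing from `dependents`) or unbounded recursion (a reachable
-- cycle along `dependents` edges, on which A never returns).
def Pre_ndependents (dependencies : List (String × List String)) (dependents : List (String × List String)) : Prop :=
  pvPreCheck dependencies dependents = true
instance (dependencies : List (String × List String)) (dependents : List (String × List String)) : Decidable (Pre_ndependents dependencies dependents) := by unfold Pre_ndependents; infer_instance

def pvWitness_ndependents : (List (String × List String)) × (List (String × List String)) :=
  ([("a", []), ("b", ["a"]), ("c", ["b"])], [("a", ["b"]), ("b", ["c"]), ("c", [])])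

def Spec_ndependents (dependencies : List (String × List String)) (dependents : List (String × List String)) (out : List (String × Int)) : Prop := out = ndependents_alt dependencies dependents
instance (dependencies : List (String × List String)) (dependents : List (String × List String)) (out : List (String × Int)) : Decidable (Spec_ndependents dependencies dependents out) := by unfold Spec_ndependents; infer_instance

-- ===== CLAIM (what is proved, stated in full; the proofs are below) =====
def Claim_equal_ndependents : Prop := ∀ (dependencies : List (String × List String)) (dependents : List (String × List String)), Dom_ndependents dependencies dependents → Pre_ndependents dependencies dependents → Spec_ndependents dependencies dependents (ndependents dependencies dependents)

-- ===== LEMMAS AND PROOFS =====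

-- ---- step-equation lemmas for the two fueled loops ----

theorem pvGoA_zero (D : PySem.Dict String (List String)) (key : String) (r : PySem.Dict String Int) :
    pvGoA D 0 key r = none := by rw [pvGoA]

theorem pvGoA_hit (D : PySem.Dict String (List String)) (n : Nat) (key : String)
    (r : PySem.Dict String Int) {v : Int} (h : r.get? key = some v) :
    pvGoA D (n+1) key r = some (r, v) := by rw [pvGoA]; simp [h]

theorem pvGoA_missD (D : PySem.Dict String (List String)) (n : Nat) (key : String)
    (r : PySem.Dict String Int) (h : r.get? key = none) (hD : D.get? key = none) :
    pvGoA D (n+1) key r = none := by rw [pvGoA]; simp [h, hD]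

theorem pvGoA_miss (D : PySem.Dict String (List String)) (n : Nat) (key : String)
    (r : PySem.Dict String Int) {deps : List String}
    (h : r.get? key = none) (hD : D.get? key = some deps) :
    pvGoA D (n+1) key r =
      match pvGoAList D n deps r with
      | none => none
      | some (r1, s) => some (r1.insert key (s + 1), s + 1) := by
  rw [pvGoA]; simp [h, hD]

theorem pvGoAList_nil (D : PySem.Dict String (List String)) (n : Nat) (r : PySem.Dict String Int) :
    pvGoAList D n [] r = some (r, 0) := by rw [pvGoAList]

theorem pvGoAList_cons (D : PySem.Dict String (List String)) (n : Nat) (k : String)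
    (ks : List String) (r : PySem.Dict String Int) :
    pvGoAList D n (k :: ks) r =
      match pvGoA D n k r with
      | none => none
      | some (r1, v) =>
        match pvGoAList D n ks r1 with
        | none => none
        | some (r2, s) => some (r2, v + s) := by rw [pvGoAList]

theorem pvGoB_nil (D : PySem.Dict String (List String)) (n : Nat) (r : PySem.Dict String Int) :
    pvGoB D n [] r = some r := by rw [pvGoB]

theorem pvGoB_fin (D : PySem.Dict String (List String)) (n : Nat) (key : String) (acc : Int)
    (fs : List (String × List String × Int)) (r : PySem.Dict String Int) :
    pvGoB D n ((key, [], acc) :: fs) r = pvGoB D n fs (r.insert key (acc + 1)) := by rw [pvGoB]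

theorem pvGoB_res (D : PySem.Dict String (List String)) (n : Nat) (key d : String) (ds : List String)
    (acc : Int) (fs : List (String × List String × Int)) (r : PySem.Dict String Int) {v : Int}
    (h : r.get? d = some v) :
    pvGoB D n ((key, d :: ds, acc) :: fs) r = pvGoB D n ((key, ds, acc + v) :: fs) r := by
  rw [pvGoB]; simp [h]

theorem pvGoB_push (D : PySem.Dict String (List String)) (m : Nat) (key d : String) (ds : List String)
    (acc : Int) (fs : List (String × List String × Int)) (r : PySem.Dict String Int) {dd : List String}
    (h : r.get? d = none) (hD : D.get? d = some dd) :
    pvGoB D (m+1) ((key, d :: ds, acc) :: fs) r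
      = pvGoB D m ((d, dd, 0) :: (key, d :: ds, acc) :: fs) r := by
  rw [pvGoB]; simp [h, hD]

-- ---- the invariant packages proved about A's recursion (and its simulation by B's stack) ----

def pvAok (D : PySem.Dict String (List String)) (S : List String) (rk : String → Nat) (n : Nat) : Prop :=
  ∀ key r r' v, key ∈ S → pvGoA D n key r = some (r', v) →
    (r'.get? key = some v)
    ∧ (∀ j w, r.get? j = some w → r'.get? j = some w)
    ∧ (∀ j, r.get? j = none → r'.get? j ≠ none → rk j ≤ rk key)
    ∧ (∀ j, r'.get? j ≠ none → r.get? j ≠ none ∨ j ∈ S)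
    ∧ (r.keys.Nodup → r'.keys.Nodup)
    ∧ (∀ w, r.get? key = some w → r' = r ∧ v = w)
    ∧ (r.get? key = none →
        ∃ deps p, D.get? key = some deps
          ∧ (∀ fs n', pvGoB D (n' + p) ((key, deps, 0) :: fs) r = pvGoB D n' fs r')
          ∧ r.keys.length + p + 1 ≤ r'.keys.length)

def pvLok (D : PySem.Dict String (List String)) (S : List String) (rk : String → Nat) (n : Nat) : Prop :=
  ∀ ks r r1 s, (∀ k ∈ ks, k ∈ S) → pvGoAList D n ks r = some (r1, s) →
    (∀ j w, r.get? j = some w → r1.get? j = some w)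
    ∧ (∀ j, r.get? j = none → r1.get? j ≠ none → ∃ k ∈ ks, rk j ≤ rk k)
    ∧ (∀ j, r1.get? j ≠ none → r.get? j ≠ none ∨ j ∈ S)
    ∧ (r.keys.Nodup → r1.keys.Nodup)
    ∧ ∃ p, (∀ key acc fs n',
          pvGoB D (n' + p) ((key, ks, acc) :: fs) r = pvGoB D n' ((key, [], acc + s) :: fs) r1)
        ∧ r.keys.length + p ≤ r1.keys.length

theorem pvLstep (D : PySem.Dict String (List String)) (S : List String) (rk : String → Nat)
    (Hrank : ∀ k ∈ S, ∀ deps, D.get? k = some deps → ∀ d ∈ deps, rk d < rk k)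
    (Hsat : ∀ k ∈ S, ∀ deps, D.get? k = some deps → ∀ d ∈ deps, d ∈ S)
    (n : Nat) (hA : pvAok D S rk n) : pvLok D S rk n := by
  intro ks
  induction ks with
  | nil =>
    intro r r1 s _ hgo
    rw [pvGoAList_nil] at hgo
    simp only [Option.some.injEq, Prod.mk.injEq] at hgo
    obtain ⟨hr1, hs⟩ := hgo
    subst hr1; subst hs
    refine ⟨fun j w hw => hw, ?_, fun j hj => Or.inl hj, fun h => h, 0, ?_, by omega⟩
    · intro j hjn hjs; exact absurd hjn hjs
    · intro key acc fs n'
      norm_num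
  | cons k ks ih =>
    intro r r1 s hks hgo
    rw [pvGoAList_cons] at hgo
    cases hgoA : pvGoA D n k r with
    | none => rw [hgoA] at hgo; cases hgo
    | some pa =>
      obtain ⟨ra, v⟩ := pa
      rw [hgoA] at hgo
      dsimp only at hgo
      cases hgoL : pvGoAList D n ks ra with
      | none => rw [hgoL] at hgo; cases hgo
      | some pl =>
        obtain ⟨r2, s'⟩ := pl
        rw [hgoL] at hgo
        simp only [Option.some.injEq, Prod.mk.injEq] at hgo
        obtain ⟨hr1, hs⟩ := hgo
        subst hr1; subst hs
        obtain ⟨A1, A2, A3, A4, A5, A6, A7⟩ :=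
          hA k r ra v (hks k List.mem_cons_self) hgoA
        obtain ⟨Lpres, Lrk, Lsub, Lnodup, ⟨pt, Lsim, Lsz⟩⟩ :=
          ih ra r2 s' (fun q hq => hks q (List.mem_cons_of_mem _ hq)) hgoL
        refine ⟨?_, ?_, ?_, ?_, ?_⟩
        · intro j w hw; exact Lpres j w (A2 j w hw)
        · intro j hjn hj1
          cases hra : ra.get? j with
          | some u =>
            exact ⟨k, List.mem_cons_self, A3 j hjn (by simp [hra])⟩
          | none =>
            obtain ⟨k', hk', hle⟩ := Lrk j hra hj1
            exact ⟨k', List.mem_cons_of_mem _ hk', hle⟩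
        · intro j hj1
          rcases Lsub j hj1 with hcase | hcase
          · rcases A4 j hcase with h2 | h2
            · exact Or.inl h2
            · exact Or.inr h2
          · exact Or.inr hcase
        · intro hnd; exact Lnodup (A5 hnd)
        · cases hmem : r.get? k with
          | some w =>
            obtain ⟨hra, hv⟩ := A6 w hmem
            subst hv
            rw [hra] at Lsim Lsz
            refine ⟨pt, ?_, Lsz⟩
            intro key acc fs n'
            rw [pvGoB_res D (n' + pt) key k ks acc fs r hmem]
            rw [Lsim key (acc + v) fs n']
            rw [add_assoc]
          | none =>
            obtain ⟨deps, pA, hDk, simA, szA⟩ := A7 hmem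
            refine ⟨1 + pA + pt, ?_, by omega⟩
            intro key acc fs n'
            have harith : n' + (1 + pA + pt) = ((n' + pt) + pA) + 1 := by omega
            rw [harith]
            rw [pvGoB_push D ((n' + pt) + pA) key k ks acc fs r hmem hDk]
            rw [simA ((key, k :: ks, acc) :: fs) (n' + pt)]
            rw [pvGoB_res D (n' + pt) key k ks acc fs ra A1]
            rw [Lsim key (acc + v) fs n']
            rw [add_assoc]

theorem pvAstep (D : PySem.Dict String (List String)) (S : List String) (rk : String → Nat)
    (Hrank : ∀ k ∈ S, ∀ deps, D.get? k = some deps → ∀ d ∈ deps, rk d < rk k)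
    (Hsat : ∀ k ∈ S, ∀ deps, D.get? k = some deps → ∀ d ∈ deps, d ∈ S)
    (n : Nat) : pvAok D S rk n := by
  induction n with
  | zero =>
    intro key r r' v _ hgo
    rw [pvGoA_zero] at hgo
    cases hgo
  | succ n ihn =>
    have hL := pvLstep D S rk Hrank Hsat n ihn
    intro key r r' v hkey hgo
    cases hmem : r.get? key with
    | some w =>
      rw [pvGoA_hit D n key r hmem] at hgo
      simp only [Option.some.injEq, Prod.mk.injEq] at hgo
      obtain ⟨hr', hv⟩ := hgo
      subst hr'; subst hv
      refine ⟨hmem, fun j w hw => hw, ?_, fun j hj => Or.inl hj, fun h => h, ?_, ?_⟩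
      · intro j hjn hjs; exact absurd hjn hjs
      · intro w' hw'
        cases hw'
        exact ⟨rfl, rfl⟩
      · intro hnone; cases hnone
    | none =>
      cases hD : D.get? key with
      | none =>
        rw [pvGoA_missD D n key r hmem hD] at hgo
        cases hgo
      | some deps =>
        rw [pvGoA_miss D n key r hmem hD] at hgo
        cases hlist : pvGoAList D n deps r with
        | none => rw [hlist] at hgo; cases hgo
        | some pr =>
          obtain ⟨r1, s⟩ := pr
          rw [hlist] at hgo
          simp only [Option.some.injEq, Prod.mk.injEq] at hgo
          obtain ⟨hr', hv⟩ := hgo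
          have hks : ∀ k ∈ deps, k ∈ S := Hsat key hkey deps hD
          obtain ⟨Lpres, Lrk, Lsub, Lnodup, ⟨p, Lsim, Lsz⟩⟩ := hL deps r r1 s hks hlist
          have hfresh : r1.get? key = none := by
            cases hf : r1.get? key with
            | none => rfl
            | some u =>
              exfalso
              obtain ⟨k, hkdeps, hle⟩ := Lrk key hmem (by simp [hf])
              have := Hrank key hkey deps hD k hkdeps
              omega
          subst hr'; subst hv
          refine ⟨PySem.Dict.get?_insert_self r1 key (s+1), ?_, ?_, ?_, ?_, ?_, ?_⟩
          · intro j w hw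
            have hj1 := Lpres j w hw
            by_cases hjk : j = key
            · subst hjk; rw [hmem] at hw; cases hw
            · rw [PySem.Dict.get?_insert_of_ne r1 (s+1) hjk]; exact hj1
          · intro j hjn hj'
            by_cases hjk : j = key
            · subst hjk; exact le_refl _
            · rw [PySem.Dict.get?_insert_of_ne r1 (s+1) hjk] at hj'
              obtain ⟨k, hkdeps, hle⟩ := Lrk j hjn hj'
              have := Hrank key hkey deps hD k hkdeps
              omega
          · intro j hj'
            by_cases hjk : j = key
            · subst hjk; exact Or.inr hkey
            · rw [PySem.Dict.get?_insert_of_ne r1 (s+1) hjk] at hj'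
              exact Lsub j hj'
          · intro hnd; exact PySem.Dict.nodup_keys_insert r1 key (s+1) (Lnodup hnd)
          · intro w hw; cases hw
          · intro _
            refine ⟨deps, p, rfl, ?_, ?_⟩
            · intro fs n'
              have h1 := Lsim key 0 fs n'
              rw [h1, pvGoB_fin]
              norm_num
            · have hcontains : r1.contains key = false :=
                (PySem.Dict.get?_eq_none_iff_contains r1 key).1 hfresh
              have hkeys := PySem.Dict.keys_insert_of_not_contains r1 (s+1) hcontains
              rw [hkeys, List.length_append]
              simp only [List.length_cons, List.length_nil]
              omega

def pvAterm (D : PySem.Dict String (List String)) (S : List String) (rk : String → Nat) (n : Nat) : Prop :=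
  ∀ key r, key ∈ S → rk key < n → (pvGoA D n key r).isSome
def pvLterm (D : PySem.Dict String (List String)) (S : List String) (rk : String → Nat) (n : Nat) : Prop :=
  ∀ ks r, (∀ k ∈ ks, k ∈ S ∧ rk k < n) → (pvGoAList D n ks r).isSome

theorem pvLtermStep (D : PySem.Dict String (List String)) (S : List String) (rk : String → Nat)
    (n : Nat) (hA : pvAterm D S rk n) : pvLterm D S rk n := by
  intro ks
  induction ks with
  | nil => intro r _; rw [pvGoAList_nil]; rfl
  | cons k ks ih =>
    intro r hall
    have h1 := hA k r (hall k List.mem_cons_self).1 (hall k List.mem_cons_self).2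
    obtain ⟨⟨r1, v⟩, hv⟩ := Option.isSome_iff_exists.1 h1
    have h2 := ih r1 (fun q hq => hall q (List.mem_cons_of_mem _ hq))
    obtain ⟨⟨r2, s2⟩, hs⟩ := Option.isSome_iff_exists.1 h2
    rw [pvGoAList_cons, hv]
    dsimp only
    rw [hs]
    rfl

theorem pvAtermAll (D : PySem.Dict String (List String)) (S : List String) (rk : String → Nat)
    (Hclo : ∀ k ∈ S, (D.get? k).isSome)
    (Hrank : ∀ k ∈ S, ∀ deps, D.get? k = some deps → ∀ d ∈ deps, rk d < rk k)
    (Hsat : ∀ k ∈ S, ∀ deps, D.get? k = some deps → ∀ d ∈ deps, d ∈ S)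
    (n : Nat) : pvAterm D S rk n := by
  induction n with
  | zero => intro key r _ h; omega
  | succ n ih =>
    intro key r hkey hrk
    cases hmem : r.get? key with
    | some v => rw [pvGoA_hit D n key r hmem]; rfl
    | none =>
      obtain ⟨deps, hdeps⟩ := Option.isSome_iff_exists.1 (Hclo key hkey)
      have hlist := pvLtermStep D S rk n ih deps r (fun d hd =>
        ⟨Hsat key hkey deps hdeps d hd, by
          have := Hrank key hkey deps hdeps d hd; omega⟩)
      obtain ⟨⟨r1, s1⟩, hs⟩ := Option.isSome_iff_exists.1 hlist
      rw [pvGoA_miss D n key r hmem hdeps, hs]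
      rfl

-- ---- reachability-set helpers ----

theorem pvFoldlUpdate_superset (D : PySem.Dict String (List String)) (l : List String)
    (acc : List String) (x : String) (h : x ∈ acc) :
    x ∈ l.foldl (fun s k => PySem.Set.update s (D.getD k [])) acc := by
  induction l generalizing acc with
  | nil => exact h
  | cons k ks ih => exact ih _ ((PySem.Set.mem_update _ _ _).2 (Or.inl h))

theorem pvFoldlUpdate_child (D : PySem.Dict String (List String)) (l : List String)
    (acc : List String) (k x : String) (hk : k ∈ l) (hx : x ∈ D.getD k []) :
    x ∈ l.foldl (fun s k => PySem.Set.update s (D.getD k [])) acc := by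
  induction l generalizing acc with
  | nil => cases hk
  | cons a as ih =>
    rcases List.mem_cons.1 hk with h | h
    · subst h
      exact pvFoldlUpdate_superset D as _ x ((PySem.Set.mem_update _ _ _).2 (Or.inr hx))
    · exact ih _ h

theorem pvReach_superset (C D : PySem.Dict String (List String)) (x : String)
    (h : x ∈ (C.items.filter (fun p => p.2.isEmpty)).map Prod.fst) : x ∈ pvReach C D := by
  unfold pvReach
  generalize C.items.length + D.items.length + 1 = n
  induction n with
  | zero => simpa [PySem.Set.mem_ofList] using h
  | succ m ih =>
    rw [Function.iterate_succ_apply']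
    exact pvFoldlUpdate_superset D _ _ x ih

-- ---- what pvPreCheck = true gives ----

theorem pvPre_facts (dependencies dependents : List (String × List String))
    (h : pvPreCheck dependencies dependents = true) :
    (∀ k ∈ pvReach (PySem.Dict.ofList dependencies) (PySem.Dict.ofList dependents),
        ((PySem.Dict.ofList dependents).get? k).isSome)
    ∧ (∀ k ∈ pvReach (PySem.Dict.ofList dependencies) (PySem.Dict.ofList dependents),
        ∀ deps, (PySem.Dict.ofList dependents).get? k = some deps →
          ∀ d ∈ deps, (pvRanks (PySem.Dict.ofList dependents)).getD d 0 < (pvRanks (PySem.Dict.ofList dependents)).getD k 0)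
    ∧ (∀ k ∈ pvReach (PySem.Dict.ofList dependencies) (PySem.Dict.ofList dependents),
        ∀ deps, (PySem.Dict.ofList dependents).get? k = some deps →
          ∀ d ∈ deps, d ∈ pvReach (PySem.Dict.ofList dependencies) (PySem.Dict.ofList dependents))
    ∧ (∀ k ∈ pvReach (PySem.Dict.ofList dependencies) (PySem.Dict.ofList dependents),
        (pvRanks (PySem.Dict.ofList dependents)).getD k 0 ≤ (PySem.Dict.ofList dependents).items.length) := by
  unfold pvPreCheck at h
  simp only [Bool.and_eq_true, List.all_eq_true, beq_iff_eq, decide_eq_true_eq] at h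
  obtain ⟨⟨⟨hfix, hclo⟩, hrank⟩, hbound⟩ := h
  refine ⟨?_, ?_, ?_, ?_⟩
  · intro k hk
    have h1 := hclo k hk
    rw [PySem.Dict.contains_eq_isSome_get?] at h1
    simp [h1]
  · intro k hk deps hdeps d hd
    have h2 := hrank k hk
    have h3 : (PySem.Dict.ofList dependents).getD k [] = deps := by
      rw [PySem.Dict.getD_eq_get?_getD, hdeps]; rfl
    rw [h3] at h2
    exact h2 d hd
  · intro k hk deps hdeps d hd
    rw [← hfix]
    unfold pvReachStep
    apply pvFoldlUpdate_child _ _ _ k d hk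
    rw [PySem.Dict.getD_eq_get?_getD, hdeps]
    exact hd
  · intro k hk
    exact hbound k hk

-- ---- the two result dictionaries agree ----

def pvInv (D : PySem.Dict String (List String)) (r : PySem.Dict String Int) : Prop :=
  r.keys.Nodup ∧ ∀ j, r.get? j ≠ none → ((D.get? j).isSome : Prop)

theorem pvInvInsert (D : PySem.Dict String (List String)) (r : PySem.Dict String Int)
    (h : pvInv D r) (k : String) (v : Int) (hk : (D.get? k).isSome) : pvInv D (r.insert k v) := by
  refine ⟨PySem.Dict.nodup_keys_insert r k v h.1, ?_⟩
  intro j hj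
  by_cases hjk : j = k
  · subst hjk; exact hk
  · rw [PySem.Dict.get?_insert_of_ne r v hjk] at hj
    exact h.2 j hj

theorem pvInvEmpty (D : PySem.Dict String (List String)) : pvInv D (PySem.Dict.empty : PySem.Dict String Int) := by
  refine ⟨PySem.Dict.nodup_keys_empty, ?_⟩
  intro j hj
  simp [PySem.Dict.get?_empty] at hj

theorem pvKeysLen_le (D : PySem.Dict String (List String)) (r : PySem.Dict String Int)
    (h : pvInv D r) : r.keys.length ≤ D.items.length := by
  classical
  have hsub : r.keys ⊆ D.keys := by
    intro j hj
    have h1 : r.get? j ≠ none := by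
      simp [PySem.Dict.get?_eq_none_iff_not_mem_keys, hj]
    have h2 := h.2 j h1
    have h3 : D.contains j = true := by
      rw [PySem.Dict.contains_eq_isSome_get?]; exact h2
    exact (PySem.Dict.contains_iff_mem_keys D j).1 h3
  have hlen : D.keys.length = D.items.length := by
    simp [PySem.Dict.keys]
  calc r.keys.length = r.keys.toFinset.card := (List.toFinset_card_of_nodup h.1).symm
    _ ≤ D.keys.toFinset.card := Finset.card_le_card (by
        intro x hx; simp only [List.mem_toFinset] at *; exact hsub hx)
    _ ≤ D.keys.length := D.keys.toFinset_card_le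
    _ = D.items.length := hlen

theorem pvLeafStep (D : PySem.Dict String (List String)) (S : List String) (rk : String → Nat)
    (Hclo : ∀ k ∈ S, (D.get? k).isSome)
    (Hrank : ∀ k ∈ S, ∀ deps, D.get? k = some deps → ∀ d ∈ deps, rk d < rk k)
    (Hsat : ∀ k ∈ S, ∀ deps, D.get? k = some deps → ∀ d ∈ deps, d ∈ S)
    (Hbound : ∀ k ∈ S, rk k ≤ D.items.length)
    (leaf : String) (hleaf : leaf ∈ S) (r : PySem.Dict String Int) (hr : pvInv D r) :
    (match pvGoA D (D.items.length + 1) leaf r with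
      | some p => p.1
      | none => r)
    = (if (r.get? leaf).isSome then r
       else
        match D.get? leaf with
        | none => r
        | some dd => (pvGoB D (D.items.length + 1) [(leaf, dd, 0)] r).getD r)
    ∧ pvInv D (match pvGoA D (D.items.length + 1) leaf r with
      | some p => p.1
      | none => r) := by
  have hterm := pvAtermAll D S rk Hclo Hrank Hsat (D.items.length + 1) leaf r hleaf
    (by have := Hbound leaf hleaf; omega)
  obtain ⟨⟨r', v⟩, hgo⟩ := Option.isSome_iff_exists.1 hterm
  have hP := pvAstep D S rk Hrank Hsat (D.items.length + 1) leaf r r' v hleaf hgo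
  obtain ⟨hmemo, hpres, hrknew, hkeysub, hnodup, hhit, hsim⟩ := hP
  have hinv' : pvInv D r' := by
    refine ⟨hnodup hr.1, ?_⟩
    intro j hj
    rcases hkeysub j hj with hcase | hcase
    · exact hr.2 j hcase
    · exact Hclo j hcase
  rw [hgo]
  dsimp only
  cases hmem : r.get? leaf with
  | some w =>
    obtain ⟨hr', _⟩ := hhit w hmem
    subst hr'
    refine ⟨?_, hinv'⟩
    rw [if_pos (by simp)]
  | none =>
    obtain ⟨deps, p, hdeps, hsim', hsz⟩ := hsim hmem
    refine ⟨?_, hinv'⟩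
    rw [if_neg (by simp), hdeps]
    have hle : r'.keys.length ≤ D.items.length := pvKeysLen_le D r' hinv'
    have hplen : p ≤ D.items.length := by omega
    have heq := hsim' [] (D.items.length + 1 - p)
    rw [Nat.sub_add_cancel (by omega)] at heq
    dsimp only
    rw [heq, pvGoB_nil]
    rfl

theorem pvFolds (D : PySem.Dict String (List String)) (S : List String) (rk : String → Nat)
    (Hclo : ∀ k ∈ S, (D.get? k).isSome)
    (Hrank : ∀ k ∈ S, ∀ deps, D.get? k = some deps → ∀ d ∈ deps, rk d < rk k)
    (Hsat : ∀ k ∈ S, ∀ deps, D.get? k = some deps → ∀ d ∈ deps, d ∈ S)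
    (Hbound : ∀ k ∈ S, rk k ≤ D.items.length)
    (l : List (String × List String)) (hl : ∀ p ∈ l, p.2.isEmpty = true → p.1 ∈ S)
    (r : PySem.Dict String Int) (hr : pvInv D r) :
    ((l.filter (fun p => p.2.isEmpty)).map Prod.fst).foldl (fun r leaf =>
        match pvGoA D (D.items.length + 1) leaf r with
        | some p => p.1
        | none => r) r
    = l.foldl (fun r p =>
        if p.2.isEmpty then
          if (r.get? p.1).isSome then r
          else
            match D.get? p.1 with
            | none => r
            | some dd => (pvGoB D (D.items.length + 1) [(p.1, dd, 0)] r).getD r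
        else r) r := by
  induction l generalizing r with
  | nil => rfl
  | cons q qs ih =>
    by_cases hq : q.2.isEmpty
    · simp only [List.filter_cons, hq, List.map_cons, List.foldl_cons, if_pos hq]
      have hstep := pvLeafStep D S rk Hclo Hrank Hsat Hbound q.1
        (hl q List.mem_cons_self hq) r hr
      rw [← hstep.1]
      exact ih (fun q' hq' => hl q' (List.mem_cons_of_mem _ hq')) _ hstep.2
    · simp only [List.filter_cons, hq, List.foldl_cons, if_neg hq]
      simpa using ih (fun q' hq' => hl q' (List.mem_cons_of_mem _ hq')) r hr

theorem pvInit (D : PySem.Dict String (List String)) :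
    ((D.items.filter (fun p => p.2.isEmpty)).map Prod.fst).foldl
        (fun r k => r.insert k (1 : Int)) PySem.Dict.empty
    = D.items.foldl (fun r p => if p.2.isEmpty then r.insert p.1 (1 : Int) else r) PySem.Dict.empty := by
  suffices hgen : ∀ (l : List (String × List String)) (r0 : PySem.Dict String Int),
      ((l.filter (fun p => p.2.isEmpty)).map Prod.fst).foldl (fun r k => r.insert k (1 : Int)) r0
      = l.foldl (fun r p => if p.2.isEmpty then r.insert p.1 (1 : Int) else r) r0 by
    exact hgen D.items PySem.Dict.empty
  intro l
  induction l with
  | nil => intro r0; rfl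
  | cons p ps ih =>
    intro r0
    by_cases hp : p.2.isEmpty
    · simp only [List.filter_cons, hp, List.map_cons, List.foldl_cons, if_pos hp]
      exact ih _
    · simp only [List.filter_cons, hp, List.foldl_cons, if_neg hp]
      simpa using ih r0

theorem pvInitInv (D : PySem.Dict String (List String)) (hD : D.keys.Nodup) :
    pvInv D (D.items.foldl (fun r p => if p.2.isEmpty then r.insert p.1 (1 : Int) else r) PySem.Dict.empty) := by
  suffices hgen : ∀ (l : List (String × List String)) (r0 : PySem.Dict String Int),
      pvInv D r0 → (∀ p ∈ l, ((D.get? p.1).isSome : Prop)) →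
      pvInv D (l.foldl (fun r p => if p.2.isEmpty then r.insert p.1 (1 : Int) else r) r0) by
    refine hgen D.items PySem.Dict.empty (pvInvEmpty D) ?_
    intro p hp
    have h1 : D.get? p.1 = some p.2 := PySem.Dict.get?_of_mem_items D (by simpa using hp) hD
    simp [h1]
  intro l
  induction l with
  | nil => intro r0 h0 _; exact h0
  | cons p ps ih =>
    intro r0 h0 hall
    simp only [List.foldl_cons]
    by_cases hp : p.2.isEmpty
    · rw [if_pos hp]
      exact ih _ (pvInvInsert D r0 h0 p.1 1 (hall p List.mem_cons_self)) (fun q hq => hall q (List.mem_cons_of_mem _ hq))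
    · rw [if_neg hp]
      exact ih _ h0 (fun q hq => hall q (List.mem_cons_of_mem _ hq))

-- ===== VERDICT (by name: the statement is the Claim_ definition above) =====
theorem ndependents_spec : Claim_equal_ndependents := by
  intro dependencies dependents _hdom hpre
  unfold Spec_ndependents ndependents ndependents_alt
  obtain ⟨Hclo, Hrank, Hsat, Hbound⟩ := pvPre_facts dependencies dependents hpre
  have hinit := pvInit (PySem.Dict.ofList dependents)
  have hinv := pvInitInv (PySem.Dict.ofList dependents) (PySem.Dict.nodup_keys_ofList _)
  simp only []
  rw [hinit]
  rw [pvFolds (PySem.Dict.ofList dependents)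
        (pvReach (PySem.Dict.ofList dependencies) (PySem.Dict.ofList dependents))
        (fun k => (pvRanks (PySem.Dict.ofList dependents)).getD k 0)
        Hclo Hrank Hsat Hbound _ ?_ _ hinv]
  intro p hp hempty
  exact pvReach_superset _ _ _ (List.mem_map.2 ⟨p, List.mem_filter.2 ⟨hp, hempty⟩, rfl⟩)
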